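-- pv_equiv track=rewrite | github.com/loribean/hackerrank | array_int.py | solution
-- ===== SOURCE A (Python) =====
-- def solution(S):
--     letters = list(set(S))
--     max_capital = None
--
--     for letter in letters:
--         if letter.isupper() and letter.lower() in letters:
--             if max_capital is None or letter > max_capital:
--                 max_capital = letter
--
--     if max_capital is None:
--         return "NO"
--     else:
--         return max_capital
-- ===== SOURCE B (Python) =====
-- def solution(S):
--     for c in "ZYXWVUTSRQPONMLKJIHGFEDCBA":
--         if c in S and c.lower() in S:
--             return c
--     return "NO"
-- ===== Notes on version B (the rewrite author's own statement) =====
-- stated objective: idiomatic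
-- what changed: Replaces A's build-a-unique-letter-list-then-track-a-running-maximum loop with a descending scan over the fixed uppercase alphabet that returns the first letter present in S whose lowercase is also in S.
import Mathlib
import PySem

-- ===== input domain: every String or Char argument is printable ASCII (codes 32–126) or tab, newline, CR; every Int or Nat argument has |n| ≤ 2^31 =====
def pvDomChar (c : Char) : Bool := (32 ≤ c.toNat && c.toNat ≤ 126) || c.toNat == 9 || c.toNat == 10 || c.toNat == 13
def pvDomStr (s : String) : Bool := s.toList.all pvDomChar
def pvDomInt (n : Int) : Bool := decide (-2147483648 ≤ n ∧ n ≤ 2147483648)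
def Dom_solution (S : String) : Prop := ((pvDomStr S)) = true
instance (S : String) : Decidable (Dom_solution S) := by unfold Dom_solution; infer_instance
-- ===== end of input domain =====

-- B replaces A's unique-letter-set + running-maximum loop by a short-circuiting
-- descending scan of the fixed uppercase alphabet (idiomatic; same exact result).


-- ===== PORT A =====
-- A's loop body, named so the fold is readable (if letter qualifies, update the running max)
def pvStepA (p : Char → Bool) (acc : Option Char) (c : Char) : Option Char :=
  if p c then
    match acc with
    | none => some c
    | some m => if m < c then some c else some m
  else acc

-- letters = list(set(S)); running maximum over letters of the uppercase letters whose
-- lowercase is also among letters.  (Python iterates the set in hash order, but the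
-- running maximum does not depend on the iteration order, so any fixed order is exact.)
def solution (S : String) : String :=
  let letters : List Char := PySem.Set.ofList S.toList
  let maxCapital : Option Char := letters.foldl
    (pvStepA (fun letter => PySem.Chars.isupper letter &&
                            letters.contains (PySem.Chars.lowerChar letter))) none
  match maxCapital with
  | none => "NO"
  | some c => String.ofList [c]

-- ===== PORT B =====
-- first c in the descending alphabet with c in S and c.lower() in S
-- ('c in S' for the single character c is exactly membership of c in S.toList).
def solution_alt (S : String) : String :=
  let cs := S.toList
  match "ZYXWVUTSRQPONMLKJIHGFEDCBA".toList.find?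
      (fun c => cs.contains c && cs.contains (PySem.Chars.lowerChar c)) with
  | some c => String.ofList [c]
  | none => "NO"

-- ===== PRECONDITION & SPEC =====
def Spec_solution (S : String) (out : String) : Prop := out = solution_alt S
instance (S : String) (out : String) : Decidable (Spec_solution S out) := by unfold Spec_solution; infer_instance

-- ===== CLAIM (what is proved, stated in full; the proofs are below) =====
def Claim_equal_solution : Prop := ∀ (S : String), Dom_solution S → Spec_solution S (solution S)

-- ===== LEMMAS AND PROOFS =====

lemma contains_iff (l : List Char) (x : Char) : l.contains x = true ↔ x ∈ l := by
  simp

lemma fold_none_iff (p : Char → Bool) :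
    ∀ (l : List Char) (acc : Option Char),
      l.foldl (pvStepA p) acc = none ↔ acc = none ∧ ∀ c ∈ l, p c = false := by
  intro l
  induction l with
  | nil => intro acc; simp
  | cons c l ih =>
    intro acc
    simp only [List.foldl_cons, ih, List.mem_cons]
    constructor
    · rintro ⟨h1, h2⟩
      by_cases hp : p c = true
      · exfalso
        unfold pvStepA at h1
        rw [if_pos hp] at h1
        cases acc with
        | none => simp at h1
        | some b => by_cases hbc : b < c <;> simp only [hbc, if_true, if_false] at h1 <;> exact absurd h1 (Option.some_ne_none _)
      · have hacc : acc = none := by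
          unfold pvStepA at h1
          rwa [if_neg hp] at h1
        refine ⟨hacc, ?_⟩
        rintro d (rfl | hd)
        · exact Bool.eq_false_iff.mpr hp
        · exact h2 d hd
    · rintro ⟨rfl, h2⟩
      have hp : p c = false := h2 c (Or.inl rfl)
      refine ⟨by simp [pvStepA, hp], fun d hd => h2 d (Or.inr hd)⟩

lemma fold_sound (p : Char → Bool) :
    ∀ (l : List Char) (acc : Option Char) (m : Char),
      l.foldl (pvStepA p) acc = some m →
        ((m ∈ l ∧ p m = true) ∨ acc = some m) ∧
        (∀ c ∈ l, p c = true → c ≤ m) ∧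
        (∀ a, acc = some a → a ≤ m) := by
  intro l
  induction l with
  | nil =>
    intro acc m h
    simp only [List.foldl_nil] at h
    exact ⟨Or.inr h, by simp, fun a ha => by rw [h] at ha; cases ha; exact le_refl _⟩
  | cons c l ih =>
    intro acc m h
    simp only [List.foldl_cons] at h
    by_cases hp : p c = true
    · cases acc with
      | none =>
        have hstep : pvStepA p none c = some c := by simp [pvStepA, hp]
        rw [hstep] at h
        obtain ⟨h1, h2, h3⟩ := ih (some c) m h
        have hcm : c ≤ m := h3 c rfl
        refine ⟨Or.inl ?_, ?_, by rintro a ⟨⟩⟩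
        · rcases h1 with ⟨hm, hpm⟩ | hcm'
          · exact ⟨List.mem_cons_of_mem _ hm, hpm⟩
          · cases hcm'; exact ⟨List.mem_cons_self, hp⟩
        · intro d hd hpd
          rcases List.mem_cons.mp hd with rfl | hd'
          · exact hcm
          · exact h2 d hd' hpd
      | some b =>
        by_cases hbc : b < c
        · have hstep : pvStepA p (some b) c = some c := by simp [pvStepA, hp, hbc]
          rw [hstep] at h
          obtain ⟨h1, h2, h3⟩ := ih (some c) m h
          have hcm : c ≤ m := h3 c rfl
          refine ⟨Or.inl ?_, ?_, ?_⟩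
          · rcases h1 with ⟨hm, hpm⟩ | hcm'
            · exact ⟨List.mem_cons_of_mem _ hm, hpm⟩
            · cases hcm'; exact ⟨List.mem_cons_self, hp⟩
          · intro d hd hpd
            rcases List.mem_cons.mp hd with rfl | hd'
            · exact hcm
            · exact h2 d hd' hpd
          · rintro a ⟨⟩; exact le_of_lt (lt_of_lt_of_le hbc hcm)
        · have hstep : pvStepA p (some b) c = some b := by simp [pvStepA, hp, hbc]
          rw [hstep] at h
          obtain ⟨h1, h2, h3⟩ := ih (some b) m h
          have hbm : b ≤ m := h3 b rfl
          refine ⟨?_, ?_, ?_⟩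
          · rcases h1 with ⟨hm, hpm⟩ | hbm'
            · exact Or.inl ⟨List.mem_cons_of_mem _ hm, hpm⟩
            · exact Or.inr hbm'
          · intro d hd hpd
            rcases List.mem_cons.mp hd with rfl | hd'
            · exact le_trans (le_of_not_gt hbc) hbm
            · exact h2 d hd' hpd
          · rintro a ⟨⟩; exact hbm
    · have hstep : pvStepA p acc c = acc := by simp [pvStepA, hp]
      rw [hstep] at h
      obtain ⟨h1, h2, h3⟩ := ih acc m h
      refine ⟨?_, ?_, h3⟩
      · rcases h1 with ⟨hm, hpm⟩ | hacc
        · exact Or.inl ⟨List.mem_cons_of_mem _ hm, hpm⟩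
        · exact Or.inr hacc
      · intro d hd hpd
        rcases List.mem_cons.mp hd with rfl | hd'
        · exact absurd hpd hp
        · exact h2 d hd' hpd

-- find? on a strictly descending list returns the maximum satisfying element
lemma find_desc (p : Char → Bool) :
    ∀ (l : List Char), l.Pairwise (· > ·) →
      (l.find? p = none → ∀ c ∈ l, p c = false) ∧
      (∀ m, l.find? p = some m → m ∈ l ∧ p m = true ∧ ∀ c ∈ l, p c = true → c ≤ m) := by
  intro l
  induction l with
  | nil => intro _; simp
  | cons c l ih =>
    intro hpw
    obtain ⟨hgt, hpw'⟩ := List.pairwise_cons.mp hpw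
    obtain ⟨ihn, ihs⟩ := ih hpw'
    by_cases hp : p c = true
    · refine ⟨?_, ?_⟩
      · intro h; rw [List.find?_cons_of_pos hp] at h; exact absurd h (by simp)
      · intro m hm
        rw [List.find?_cons_of_pos hp] at hm
        cases hm
        refine ⟨List.mem_cons_self, hp, ?_⟩
        intro d hd _
        rcases List.mem_cons.mp hd with rfl | hd'
        · exact le_refl _
        · exact le_of_lt (hgt d hd')
    · have hfc : (c :: l).find? p = l.find? p :=
        List.find?_cons_of_neg (by simpa using hp)
      refine ⟨?_, ?_⟩
      · intro h d hd
        rw [hfc] at h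
        rcases List.mem_cons.mp hd with rfl | hd'
        · exact Bool.eq_false_iff.mpr hp
        · exact ihn h d hd'
      · intro m hm
        rw [hfc] at hm
        obtain ⟨hmem, hpm, hmax⟩ := ihs m hm
        refine ⟨List.mem_cons_of_mem _ hmem, hpm, ?_⟩
        intro d hd hpd
        rcases List.mem_cons.mp hd with rfl | hd'
        · exact absurd hpd hp
        · exact hmax d hd' hpd

def pvAlph : List Char := "ZYXWVUTSRQPONMLKJIHGFEDCBA".toList

set_option maxRecDepth 4000 in
lemma alph_chain : List.IsChain (· > ·) pvAlph := by decide

lemma alph_pairwise : pvAlph.Pairwise (· > ·) := alph_chain.pairwise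

set_option maxRecDepth 4000 in
lemma alph_upper_all : pvAlph.all PySem.Chars.isupper = true := by decide

lemma alph_upper : ∀ c ∈ pvAlph, PySem.Chars.isupper c = true := by
  have := alph_upper_all; rw [List.all_eq_true] at this; exact fun c hc => this c hc

lemma upper_mem_alph (c : Char) (h : PySem.Chars.isupper c = true) : c ∈ pvAlph := by
  simp only [PySem.Chars.isupper, Bool.and_eq_true, decide_eq_true_eq] at h
  obtain ⟨h1, h2⟩ := h
  have h1' : 65 ≤ c.toNat := h1
  have h2' : c.toNat ≤ 90 := h2
  have hc : Char.ofNat c.toNat = c := Char.ofNat_toNat c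
  rw [← hc]
  set n := c.toNat with hn
  clear_value n
  interval_cases n <;> decide

theorem solution_spec : Claim_equal_solution := by
  intro S _
  unfold Spec_solution solution solution_alt
  simp only []
  set L := S.toList with hL
  set letters : List Char := PySem.Set.ofList L with hletters
  set p : Char → Bool := fun letter => PySem.Chars.isupper letter &&
      letters.contains (PySem.Chars.lowerChar letter) with hp
  set q : Char → Bool := fun c => L.contains c && L.contains (PySem.Chars.lowerChar c) with hq
  have hmemL : ∀ x : Char, x ∈ letters ↔ x ∈ L := fun x => PySem.Set.mem_ofList L x
  have hcont : ∀ x : Char, letters.contains x = L.contains x := by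
    intro x
    rw [Bool.eq_iff_iff, contains_iff, contains_iff]
    exact hmemL x
  -- p on letters ↔ q plus uppercase
  have hpq : ∀ c, p c = (PySem.Chars.isupper c && L.contains (PySem.Chars.lowerChar c)) := by
    intro c; rw [hp]; simp only [hcont]
  cases hB : pvAlph.find? q with
  | none =>
    have hall : ∀ c ∈ pvAlph, q c = false := (find_desc q pvAlph alph_pairwise).1 hB
    have hnone : letters.foldl (pvStepA p) none = none := by
      rw [fold_none_iff]
      refine ⟨rfl, ?_⟩
      intro c hc
      by_contra hpc
      simp only [Bool.not_eq_false] at hpc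
      have hpc' : p c = true := hpc
      rw [hpq] at hpc'
      simp only [Bool.and_eq_true] at hpc'
      obtain ⟨hup, hlow⟩ := hpc'
      have hcal : c ∈ pvAlph := upper_mem_alph c hup
      have hqc : q c = true := by
        rw [hq]
        simp only [Bool.and_eq_true]
        exact ⟨(contains_iff _ _).mpr ((hmemL c).mp hc), hlow⟩
      rw [hall c hcal] at hqc
      exact Bool.noConfusion hqc
    rw [show ("ZYXWVUTSRQPONMLKJIHGFEDCBA".toList.find? q) = pvAlph.find? q from rfl, hB, hnone]
  | some m =>
    obtain ⟨hmal, hqm, hmax⟩ := (find_desc q pvAlph alph_pairwise).2 m hB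
    have hupm : PySem.Chars.isupper m = true := alph_upper m hmal
    have hmL : m ∈ L := by
      rw [hq] at hqm; simp only [Bool.and_eq_true] at hqm
      exact (contains_iff _ _).mp hqm.1
    have hpm : p m = true := by
      rw [hpq]; simp only [Bool.and_eq_true]
      rw [hq] at hqm; simp only [Bool.and_eq_true] at hqm
      exact ⟨hupm, hqm.2⟩
    -- the fold cannot be none
    cases hA : letters.foldl (pvStepA p) none with
    | none =>
      exfalso
      obtain ⟨-, hallp⟩ := (fold_none_iff p letters none).mp hA
      have := hallp m ((hmemL m).mpr hmL)
      rw [hpm] at this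
      exact Bool.noConfusion this
    | some r =>
      obtain ⟨h1, h2, -⟩ := fold_sound p letters none r hA
      rcases h1 with ⟨hrmem, hpr⟩ | h1'
      · -- r ≤ m and m ≤ r
        have hmr : m ≤ r := h2 m ((hmemL m).mpr hmL) hpm
        have hupr : PySem.Chars.isupper r = true := by
          rw [hpq] at hpr; simp only [Bool.and_eq_true] at hpr; exact hpr.1
        have hqr : q r = true := by
          rw [hq]; simp only [Bool.and_eq_true]
          rw [hpq] at hpr; simp only [Bool.and_eq_true] at hpr
          exact ⟨(contains_iff _ _).mpr ((hmemL r).mp hrmem), hpr.2⟩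
        have hrm : r ≤ m := hmax r (upper_mem_alph r hupr) hqr
        have : r = m := le_antisymm hrm hmr
        subst this
        rw [show ("ZYXWVUTSRQPONMLKJIHGFEDCBA".toList.find? q) = pvAlph.find? q from rfl, hB]
      · simp at h1'
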